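-- pv_equiv track=rewrite | github.com/KittenCN/predict_Lottery_ticket | kl8_analysis.py | find_consecutive_number
-- ===== SOURCE A (Python) =====
-- def find_consecutive_number(numbers):
--     consecutive_group = []
--     group = [numbers[0]]
--     for i in range(1, len(numbers)):
--         if numbers[i] - numbers[i - 1] == 1:
--             group.append(numbers[i])
--         else:
--             if len(group) > 1:
--                 consecutive_group.append(tuple(group))
--             group = [numbers[i]]
--     if len(group) > 1:
--         consecutive_group.append(tuple(group))
--     return consecutive_group
-- ===== SOURCE B (Python) =====
-- def find_consecutive_number(numbers):
--     # Two-pointer scan: for each start i, advance j to the end of the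
--     # increasing-by-one run, slice it out if longer than 1, jump i to j.
--     result = []
--     i, n = 0, len(numbers)
--     while i < n:
--         j = i + 1
--         while j < n and numbers[j] - numbers[j - 1] == 1:
--             j += 1
--         if j - i > 1:
--             result.append(tuple(numbers[i:j]))
--         i = j
--     return result
-- ===== Notes on version B (the rewrite author's own statement) =====
-- stated objective: alternative
-- what changed: Replaces A's single pass with a mutable group accumulator (append element by element, flush on break and after the loop) by a two-pointer scan that finds each run's end index and slices the run out of the list in one step; no group list is maintained.
-- crash fix: On the empty list A raises IndexError (it reads numbers[0] unconditionally); B naturally returns []. — e.g. on find_consecutive_number([]): A raises IndexError, B returns []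
import Mathlib
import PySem

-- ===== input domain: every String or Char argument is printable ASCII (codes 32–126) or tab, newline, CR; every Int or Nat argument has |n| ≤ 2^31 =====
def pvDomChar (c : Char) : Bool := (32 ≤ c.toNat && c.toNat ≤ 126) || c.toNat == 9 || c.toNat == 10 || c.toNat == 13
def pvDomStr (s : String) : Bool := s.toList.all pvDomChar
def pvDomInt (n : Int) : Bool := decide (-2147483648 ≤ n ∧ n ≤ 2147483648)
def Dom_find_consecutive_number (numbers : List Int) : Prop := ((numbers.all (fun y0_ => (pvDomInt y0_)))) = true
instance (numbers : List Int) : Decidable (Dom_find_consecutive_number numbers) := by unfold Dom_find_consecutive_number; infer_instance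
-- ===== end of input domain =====

-- B replaces A's group-accumulator pass by a two-pointer scan that slices each run out whole;
-- objective: alternative (same O(n) cost, different mechanics). A raises IndexError on [], B returns [].


-- ===== PORT A =====
-- A's loop 'for i in range(1, len(numbers))' reads numbers[i] and numbers[i-1]; it is rendered
-- as structural recursion over the suffix numbers[i:], carrying prev = numbers[i-1]; the state
-- (consecutive_group, group) and the branch order are exactly A's, and A's post-loop flush of
-- group is the [] case of the recursion.
def aLoop : Int → List Int → List (List Int) → List Int → List (List Int)
  | _, [], cg, group => if group.length > 1 then cg ++ [group] else cg
  | prev, cur :: rest, cg, group =>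
    if cur - prev == 1 then aLoop cur rest cg (group ++ [cur])
    else aLoop cur rest (if group.length > 1 then cg ++ [group] else cg) [cur]

def find_consecutive_number (numbers : List Int) : List (List Int) :=
  match numbers with
  | [] => []  -- Python: 'group = [numbers[0]]' raises IndexError here; excluded by Pre_
  | x :: xs => aLoop x xs [] [x]

-- ===== PORT B =====
-- inner while loop: advance j while numbers[j] - numbers[j-1] == 1.
-- The loop condition guarantees 0 <= j-1 < j < len(numbers), so getD is exact for numbers[j], numbers[j-1].
-- fuel is a totality guard only: the loop advances j each step, so fuel = numbers.length always suffices.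
def bRunEnd (numbers : List Int) (j : Nat) : Nat → Nat
  | 0 => j
  | fuel + 1 =>
    if j < numbers.length then
      if numbers.getD j 0 - numbers.getD (j - 1) 0 == 1 then bRunEnd numbers (j + 1) fuel else j
    else j

-- outer while loop over i, with the result accumulator (fuel again only a totality guard: i strictly increases)
def bLoop (numbers : List Int) (i : Nat) (result : List (List Int)) : Nat → List (List Int)
  | 0 => result
  | fuel + 1 =>
    if i < numbers.length then
      let j := bRunEnd numbers (i + 1) numbers.length
      bLoop numbers j
        (if j - i > 1 then result ++ [PySem.List.slice numbers (some (i : Int)) (some (j : Int))]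
         else result) fuel
    else result

def find_consecutive_number_alt (numbers : List Int) : List (List Int) :=
  bLoop numbers 0 [] (numbers.length + 1)

-- ===== PRECONDITION & SPEC =====
-- Pre_ excludes only the empty list, on which the Python A raises IndexError (numbers[0]).
def Pre_find_consecutive_number (numbers : List Int) : Prop := numbers ≠ []
instance (numbers : List Int) : Decidable (Pre_find_consecutive_number numbers) := by
  unfold Pre_find_consecutive_number; infer_instance

def pvWitness_find_consecutive_number : List Int := [1, 2, 3, 7]

-- On the empty list A raises IndexError (it reads numbers[0] unconditionally); B naturally returns [].
def Raises_find_consecutive_number (numbers : List Int) : Prop := numbers = []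
instance (numbers : List Int) : Decidable (Raises_find_consecutive_number numbers) := by
  unfold Raises_find_consecutive_number; infer_instance
def pvRaiseWitness_find_consecutive_number : List Int := []
def pvRaiseWitnessOut_find_consecutive_number : List (List Int) := []

def Spec_find_consecutive_number (numbers : List Int) (out : List (List Int)) : Prop := out = find_consecutive_number_alt numbers
instance (numbers : List Int) (out : List (List Int)) : Decidable (Spec_find_consecutive_number numbers out) := by unfold Spec_find_consecutive_number; infer_instance

-- ===== CLAIM (what is proved, stated in full; the proofs are below) =====
def Claim_equal_find_consecutive_number : Prop := ∀ (numbers : List Int), Dom_find_consecutive_number numbers → Pre_find_consecutive_number numbers → Spec_find_consecutive_number numbers (find_consecutive_number numbers)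

def Claim_raises_find_consecutive_number : Prop := (∀ (numbers : List Int), Dom_find_consecutive_number numbers → Raises_find_consecutive_number numbers → ¬ Pre_find_consecutive_number numbers) ∧ (Dom_find_consecutive_number (pvRaiseWitness_find_consecutive_number) ∧ Raises_find_consecutive_number (pvRaiseWitness_find_consecutive_number) ∧ find_consecutive_number_alt (pvRaiseWitness_find_consecutive_number) = pvRaiseWitnessOut_find_consecutive_number)

-- ===== LEMMAS AND PROOFS =====

-- Reference decomposition both ports are proved equal to: takeRun x rest is the maximal
-- increasing-by-one run starting at x together with the remainder of the list.
def takeRun : Int → List Int → List Int × List Int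
  | x, [] => ([x], [])
  | x, y :: rest =>
    if y - x = 1 then
      let p := takeRun y rest
      (x :: p.1, p.2)
    else ([x], y :: rest)

theorem takeRun_append : ∀ (x : Int) (l : List Int), (takeRun x l).1 ++ (takeRun x l).2 = x :: l := by
  intro x l
  induction l generalizing x with
  | nil => simp [takeRun]
  | cons y rest ih =>
    by_cases h : y - x = 1
    · simp [takeRun, h, ih y]
    · simp [takeRun, h]

theorem takeRun_fst_pos (x : Int) (l : List Int) : 0 < (takeRun x l).1.length := by
  cases l with
  | nil => simp [takeRun]
  | cons y rest =>
    by_cases h : y - x = 1 <;> simp [takeRun, h]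

theorem takeRun_snd_le (x : Int) (l : List Int) : (takeRun x l).2.length ≤ l.length := by
  have h := congrArg List.length (takeRun_append x l)
  have hp := takeRun_fst_pos x l
  simp at h
  omega

def go : List Int → List (List Int)
  | [] => []
  | x :: rest =>
    let p := takeRun x rest
    if p.1.length > 1 then p.1 :: go p.2 else go p.2
termination_by l => l.length
decreasing_by all_goals (have := takeRun_snd_le x rest; simp only [List.length_cons]; omega)

-- ---- A-side: aLoop equals the reference decomposition ----

theorem aLoop_acc : ∀ (rest : List Int) (prev : Int) (cg : List (List Int)) (group : List Int),
    aLoop prev rest cg group = cg ++ aLoop prev rest [] group := by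
  intro rest
  induction rest with
  | nil => intro prev cg group; simp only [aLoop]; split <;> simp
  | cons cur rest ih =>
    intro prev cg group
    simp only [aLoop]
    by_cases h : (cur - prev == 1) = true
    · rw [if_pos h, if_pos h, ih cur cg (group ++ [cur]), ih cur [] (group ++ [cur])]
    · rw [if_neg h, if_neg h,
        ih cur (if group.length > 1 then cg ++ [group] else cg) [cur],
        ih cur (if group.length > 1 then [] ++ [group] else []) [cur]]
      split <;> simp

theorem aLoop_eq_go : ∀ (rest : List Int) (x : Int) (g : List Int),
    aLoop x rest [] (g ++ [x]) =
      (if (g ++ (takeRun x rest).1).length > 1 then [g ++ (takeRun x rest).1] else []) ++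
        go (takeRun x rest).2 := by
  intro rest
  induction rest with
  | nil =>
    intro x g
    simp [aLoop, takeRun, go]
  | cons y rest ih =>
    intro x g
    simp only [aLoop]
    by_cases h : y - x = 1
    · rw [if_pos (by simpa using h), ih y (g ++ [x]),
        show takeRun x (y :: rest) = (x :: (takeRun y rest).1, (takeRun y rest).2) from by
          rw [takeRun, if_pos h]]
      simp
    · rw [if_neg (by simpa using h), aLoop_acc]
      have hy := ih y []
      simp only [List.nil_append] at hy
      rw [hy]
      have hgo : go (y :: rest) =
          (if (takeRun y rest).1.length > 1 then [(takeRun y rest).1] else []) ++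
            go (takeRun y rest).2 := by
        rw [go]; split <;> simp_all
      rw [show takeRun x (y :: rest) = ([x], y :: rest) from by rw [takeRun, if_neg h], hgo]
      split <;> simp

theorem find_eq_go : ∀ (numbers : List Int), numbers ≠ [] →
    find_consecutive_number numbers = go numbers := by
  intro numbers h
  cases numbers with
  | nil => exact absurd rfl h
  | cons x xs =>
    have := aLoop_eq_go xs x []
    simp only [List.nil_append] at this
    rw [find_consecutive_number, this, go]
    split <;> simp_all

-- ---- B-side: bLoop equals the reference decomposition ----

theorem drop_head (numbers : List Int) (i : Nat) (x : Int) (rest : List Int)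
    (h : numbers.drop i = x :: rest) : numbers.getD i 0 = x := by
  have h0 : (numbers.drop i)[0]? = some x := by rw [h]; rfl
  rw [List.getElem?_drop] at h0
  simp only [Nat.add_zero] at h0
  simp [List.getD_eq_getElem?_getD, h0]

theorem drop_tail (numbers : List Int) (i : Nat) (x : Int) (rest : List Int)
    (h : numbers.drop i = x :: rest) : numbers.drop (i + 1) = rest := by
  have h2 : (numbers.drop i).tail = numbers.drop (i + 1) := List.tail_drop
  rw [h] at h2
  simpa using h2.symm

theorem drop_len (numbers : List Int) (i : Nat) (x : Int) (rest : List Int)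
    (h : numbers.drop i = x :: rest) : numbers.length = i + rest.length + 1 := by
  have h1 := List.length_drop (l := numbers) (i := i)
  rw [h] at h1
  have h2 : i < numbers.length := by
    by_contra hc
    rw [List.drop_eq_nil_of_le (by omega)] at h
    simp at h
  simp at h1
  omega

theorem bRunEnd_spec : ∀ (rest : List Int) (numbers : List Int) (x : Int) (i fuel : Nat),
    rest.length ≤ fuel → numbers.drop i = x :: rest →
    bRunEnd numbers (i + 1) fuel = i + (takeRun x rest).1.length := by
  intro rest
  induction rest with
  | nil =>
    intro numbers x i fuel _ h
    have hl := drop_len numbers i x [] h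
    simp only [List.length_nil] at hl
    cases fuel with
    | zero => simp [bRunEnd, takeRun]
    | succ f => rw [bRunEnd, if_neg (by omega)]; simp [takeRun]
  | cons y rest' ih =>
    intro numbers x i fuel hf h
    have hl := drop_len numbers i x (y :: rest') h
    have hx : numbers.getD i 0 = x := drop_head numbers i x _ h
    have ht : numbers.drop (i + 1) = y :: rest' := drop_tail numbers i x _ h
    have hy : numbers.getD (i + 1) 0 = y := drop_head numbers (i + 1) y _ ht
    simp only [List.length_cons] at hf
    obtain ⟨f, rfl⟩ : ∃ f, fuel = f + 1 := ⟨fuel - 1, by omega⟩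
    rw [bRunEnd]
    have hlt : i + 1 < numbers.length := by simp at hl; omega
    simp only [hlt, if_true, Nat.add_sub_cancel, hx, hy]
    by_cases hc : y - x = 1
    · have := ih numbers y (i + 1) f (by omega) ht
      simp [hc, takeRun, this]
      omega
    · simp [hc, takeRun]
theorem take_run (numbers : List Int) (i : Nat) (x : Int) (rest : List Int)
    (h : numbers.drop i = x :: rest) :
    (numbers.drop i).take (takeRun x rest).1.length = (takeRun x rest).1 := by
  rw [h, ← takeRun_append x rest, List.take_left]

theorem drop_run (numbers : List Int) (i : Nat) (x : Int) (rest : List Int)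
    (h : numbers.drop i = x :: rest) :
    numbers.drop (i + (takeRun x rest).1.length) = (takeRun x rest).2 := by
  have h2 : numbers.drop (i + (takeRun x rest).1.length) =
      (numbers.drop i).drop (takeRun x rest).1.length := by
    rw [List.drop_drop]
  rw [h2, h, ← takeRun_append x rest, List.drop_left]

theorem bLoop_spec : ∀ (fuel i : Nat) (numbers : List Int) (result : List (List Int)),
    numbers.length - i ≤ fuel → bLoop numbers i result fuel = result ++ go (numbers.drop i) := by
  intro fuel
  induction fuel with
  | zero =>
    intro i numbers result h
    rw [bLoop]
    simp [List.drop_eq_nil_of_le (by omega : numbers.length ≤ i), go]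
  | succ fuel ih =>
    intro i numbers result h
    by_cases hi : i < numbers.length
    · obtain ⟨x, rest, hx⟩ : ∃ x rest, numbers.drop i = x :: rest := by
        cases hd : numbers.drop i with
        | nil => exfalso; have := List.length_drop (l := numbers) (i := i); rw [hd] at this; simp at this; omega
        | cons a b => exact ⟨a, b, rfl⟩
      have hrl : rest.length ≤ numbers.length := by
        have := drop_len numbers i x rest hx; omega
      have hj := bRunEnd_spec rest numbers x i numbers.length hrl hx
      have hpos := takeRun_fst_pos x rest
      rw [bLoop]
      simp only [hi, if_true]
      rw [hj]
      have hslice : PySem.List.slice numbers (some (i : Int)) (some ((i + (takeRun x rest).1.length : Nat) : Int)) = (takeRun x rest).1 := by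
        rw [PySem.List.slice_natCast]
        have : i + (takeRun x rest).1.length - i = (takeRun x rest).1.length := by omega
        rw [this, take_run numbers i x rest hx]
      have hrec := ih (i + (takeRun x rest).1.length) numbers
        (if (i + (takeRun x rest).1.length) - i > 1 then result ++ [PySem.List.slice numbers (some (i : Int)) (some ((i + (takeRun x rest).1.length : Nat) : Int))] else result)
        (by omega)
      push_cast at hrec ⊢
      rw [hrec, drop_run numbers i x rest hx]
      have hgo : go (numbers.drop i) =
          (if (takeRun x rest).1.length > 1 then [(takeRun x rest).1] else []) ++
            go (takeRun x rest).2 := by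
        rw [hx, go]; split <;> simp_all
      rw [hgo]
      push_cast at hslice
      rw [hslice]
      have hsub : (i + (takeRun x rest).1.length) - i = (takeRun x rest).1.length := by omega
      rw [hsub]
      split <;> simp
    · rw [bLoop]
      simp [hi, List.drop_eq_nil_of_le (by omega : numbers.length ≤ i), go]

theorem alt_eq_go (numbers : List Int) : find_consecutive_number_alt numbers = go numbers := by
  rw [find_consecutive_number_alt, bLoop_spec (numbers.length + 1) 0 numbers [] (by omega)]
  simp

-- ===== VERDICT (by name: the statement is the Claim_ definition above) =====
theorem find_consecutive_number_spec : Claim_equal_find_consecutive_number := by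
  intro numbers _ hpre
  unfold Spec_find_consecutive_number
  rw [find_eq_go numbers hpre, alt_eq_go]

theorem find_consecutive_number_raises : Claim_raises_find_consecutive_number := by
  unfold Claim_raises_find_consecutive_number
  refine ⟨fun numbers _ hr hp => hp hr, by decide, rfl, ?_⟩
  have h := alt_eq_go []
  simp only [pvRaiseWitness_find_consecutive_number, pvRaiseWitnessOut_find_consecutive_number, h]
  rw [go]

-- self-check: the stated raise witness really lies inside Raises_
theorem find_consecutive_number_raises_ok :
    Raises_find_consecutive_number pvRaiseWitness_find_consecutive_number :=
  find_consecutive_number_raises.2.2.1
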